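-- pv_equiv track=rewrite | github.com/benecristian/Python-implementation-for-SAT-solvers | dp.py | dp_solver
-- ===== SOURCE A (Python) =====
-- def unit_propagate(clauses, assignment):
--     changed = True
--     while changed:
--         changed = False
--         for clause in clauses:
--             if len(clause) == 1:
--                 lit = clause[0]
--                 assignment[abs(lit)] = lit > 0
--                 new_clauses = []
--                 for c in clauses:
--                     if lit in c:
--                         continue
--                     if -lit in c:
--                         c = [x for x in c if x != -lit]
--                     new_clauses.append(c)
--                 clauses = new_clauses
--                 changed = True
--                 break
--     return clauses, assignment
--
-- def pure_literal_assign(clauses, assignment):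
--     counts = {}
--     for clause in clauses:
--         for lit in clause:
--             counts[lit] = counts.get(lit, 0) + 1
--     for lit in counts:
--         if -lit not in counts:
--             assignment[abs(lit)] = lit > 0
--             clauses = [c for c in clauses if lit not in c]
--     return clauses, assignment
--
-- def dp_solver(clauses):
--     assignment = {}
--     clauses, assignment = unit_propagate(clauses, assignment)
--     clauses, assignment = pure_literal_assign(clauses, assignment)
--     if [] in clauses:
--         return False
--     if not clauses:
--         return True
--     var = abs(clauses[0][0])
--     new_clauses = []
--     for clause in clauses:
--         if var in clause:
--             continue
--         new_clauses.append([x for x in clause if x != -var])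
--     return dp_solver(new_clauses)
-- ===== SOURCE B (Python) =====
-- def dp_solver(clauses):
--     while True:
--         # unit propagation: repeatedly eliminate the first unit literal
--         unit = next((c[0] for c in clauses if len(c) == 1), None)
--         while unit is not None:
--             clauses = [[x for x in c if x != -unit] for c in clauses if unit not in c]
--             unit = next((c[0] for c in clauses if len(c) == 1), None)
--         # pure-literal elimination: one round over the frozen literal set
--         lits = {l for c in clauses for l in c}
--         pures = [l for l in lits if -l not in lits]
--         clauses = [c for c in clauses if not any(l in c for l in pures)]
--         if [] in clauses:
--             return False
--         if not clauses:
--             return True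
--         v = abs(clauses[0][0])
--         clauses = [[x for x in c if x != -v] for c in clauses if v not in c]
-- ===== Notes on version B (the rewrite author's own statement) =====
-- stated objective: simpler
-- what changed: dp_solver's tail recursion becomes a while-loop, the assignment dict (irrelevant to the returned bool) is dropped entirely, unit propagation's changed-flag/break rescan becomes a find-first-unit loop, and pure-literal elimination filters the clause list once against the set of pure literals instead of once per pure literal.
import Mathlib
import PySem

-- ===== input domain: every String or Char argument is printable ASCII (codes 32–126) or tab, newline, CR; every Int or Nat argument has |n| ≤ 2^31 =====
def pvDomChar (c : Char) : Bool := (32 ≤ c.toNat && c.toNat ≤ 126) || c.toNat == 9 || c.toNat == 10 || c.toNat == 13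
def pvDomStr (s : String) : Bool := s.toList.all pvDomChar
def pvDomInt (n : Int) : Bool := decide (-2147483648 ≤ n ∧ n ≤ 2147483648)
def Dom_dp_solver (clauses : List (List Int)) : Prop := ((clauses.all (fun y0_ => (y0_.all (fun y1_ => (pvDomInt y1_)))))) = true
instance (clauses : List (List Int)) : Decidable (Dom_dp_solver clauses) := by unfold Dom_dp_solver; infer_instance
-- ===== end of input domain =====

-- B replaces dp_solver's tail recursion by a loop, drops the (result-irrelevant) assignment
-- bookkeeping, and does pure-literal elimination in one pass over a frozen literal set
-- instead of one clause-list filter per pure literal (objective: simpler).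


-- fuel bound shared by both ports: every simplification step eliminates one whole variable,
-- so recursion/loop depth is at most the number of literal occurrences; the fuel-out default
-- is unreachable on inputs where the Python terminates (it terminates on all inputs).
def pvFuel (clauses : List (List Int)) : Nat := (clauses.map List.length).sum + 1

-- ===== PORT A =====
-- inner `new_clauses` loop of unit_propagate
def upNew (lit : Int) (clauses : List (List Int)) : List (List Int) :=
  clauses.foldl (fun acc c =>
    if lit ∈ c then acc
    else if -lit ∈ c then acc ++ [c.filter (fun x => decide (x ≠ -lit))]
    else acc ++ [c]) []

-- `while changed:` loop: the for/break finds the first unit clause, rebuilds clauses, restarts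
def unit_propagate (fuel : Nat) (clauses : List (List Int)) (assignment : PySem.Dict Int Bool) :
    List (List Int) × PySem.Dict Int Bool :=
  match fuel with
  | 0 => (clauses, assignment)
  | fuel + 1 =>
    match clauses.find? (fun c => c.length == 1) with
    | none => (clauses, assignment)
    | some c =>
      let lit := c.headD 0
      unit_propagate fuel (upNew lit clauses) (assignment.insert (lit.natAbs : Int) (decide (lit > 0)))

def pure_literal_assign (clauses : List (List Int)) (assignment : PySem.Dict Int Bool) :
    List (List Int) × PySem.Dict Int Bool :=
  let counts : PySem.Dict Int Int :=
    clauses.foldl (fun d c => c.foldl (fun d lit => d.insert lit (d.getD lit 0 + 1)) d) PySem.Dict.empty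
  counts.keys.foldl
    (fun st lit =>
      if (counts.get? (-lit)).isNone then
        (st.1.filter (fun c => decide (lit ∉ c)), st.2.insert (lit.natAbs : Int) (decide (lit > 0)))
      else st)
    (clauses, assignment)

def dpGo (fuel : Nat) (clauses : List (List Int)) : Bool :=
  match fuel with
  | 0 => false
  | fuel + 1 =>
    let r1 := unit_propagate (pvFuel clauses) clauses PySem.Dict.empty
    let r2 := pure_literal_assign r1.1 r1.2
    if ([] : List Int) ∈ r2.1 then false
    else if r2.1 = [] then true
    else
      let v : Int := ((r2.1.headD []).headD 0).natAbs
      dpGo fuel (r2.1.foldl (fun acc clause =>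
        if v ∈ clause then acc
        else acc ++ [clause.filter (fun x => decide (x ≠ -v))]) [])

def dp_solver (clauses : List (List Int)) : Bool := dpGo (pvFuel clauses) clauses

-- ===== PORT B =====
-- first unit literal, if any: next((c[0] for c in clauses if len(c) == 1), None)
def findUnit (clauses : List (List Int)) : Option Int :=
  clauses.findSome? (fun c => if c.length = 1 then c.head? else none)

-- [[x for x in c if x != -u] for c in clauses if u not in c]
def elim (u : Int) (clauses : List (List Int)) : List (List Int) :=
  (clauses.filter (fun c => decide (u ∉ c))).map (fun c => c.filter (fun x => decide (x ≠ -u)))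

def unitLoop (fuel : Nat) (clauses : List (List Int)) : List (List Int) :=
  match fuel with
  | 0 => clauses
  | fuel + 1 =>
    match findUnit clauses with
    | none => clauses
    | some u => unitLoop fuel (elim u clauses)

def pureElim (clauses : List (List Int)) : List (List Int) :=
  let lits : PySem.Set Int := PySem.Set.ofList (clauses.flatMap id)
  let pures := lits.filter (fun l => decide (-l ∉ lits))
  clauses.filter (fun c => !(pures.any (fun l => decide (l ∈ c))))

def dpAltGo (fuel : Nat) (clauses : List (List Int)) : Bool :=
  match fuel with
  | 0 => false
  | fuel + 1 =>
    let cls := pureElim (unitLoop (pvFuel clauses) clauses)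
    if ([] : List Int) ∈ cls then false
    else if cls = [] then true
    else dpAltGo fuel (elim (((cls.headD []).headD 0).natAbs : Int) cls)

def dp_solver_alt (clauses : List (List Int)) : Bool := dpAltGo (pvFuel clauses) clauses

-- ===== PRECONDITION & SPEC =====
def Spec_dp_solver (clauses : List (List Int)) (out : Bool) : Prop := out = dp_solver_alt clauses
instance (clauses : List (List Int)) (out : Bool) : Decidable (Spec_dp_solver clauses out) := by unfold Spec_dp_solver; infer_instance

-- ===== CLAIM (what is proved, stated in full; the proofs are below) =====
def Claim_equal_dp_solver : Prop := ∀ (clauses : List (List Int)), Dom_dp_solver clauses → Spec_dp_solver clauses (dp_solver clauses)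

-- ===== LEMMAS AND PROOFS =====

-- A's new_clauses foldl = B's filter/map comprehension (accumulator-generalized)
theorem upNew_aux (lit : Int) (cs : List (List Int)) (acc : List (List Int)) :
    cs.foldl (fun acc c =>
      if lit ∈ c then acc
      else if -lit ∈ c then acc ++ [c.filter (fun x => decide (x ≠ -lit))]
      else acc ++ [c]) acc = acc ++ elim lit cs := by
  induction cs generalizing acc with
  | nil => simp [elim]
  | cons c cs ih =>
    simp only [List.foldl_cons]
    by_cases h1 : lit ∈ c
    · rw [if_pos h1, ih]
      simp [elim, h1]
    · rw [if_neg h1]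
      by_cases h2 : -lit ∈ c
      · rw [if_pos h2, ih]
        simp [elim, h1]
      · rw [if_neg h2, ih]
        simp [elim, h1]
        exact (List.filter_eq_self.mpr (fun x hx => by
          simp only [Bool.not_eq_eq_eq_not, Bool.not_true, decide_eq_false_iff_not]
          rintro rfl; exact h2 hx)).symm

theorem upNew_eq_elim (lit : Int) (clauses : List (List Int)) : upNew lit clauses = elim lit clauses := by
  have h := upNew_aux lit clauses []
  rwa [List.nil_append] at h

-- A's find-first-unit-clause = B's first unit literal
theorem find?_eq_findUnit (clauses : List (List Int)) :
    (clauses.find? (fun c => c.length == 1)).map (fun c => c.headD 0) = findUnit clauses := by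
  induction clauses with
  | nil => rfl
  | cons c cs ih =>
    by_cases h : c.length = 1
    · obtain ⟨x, rfl⟩ : ∃ x, c = [x] := by
        cases c with
        | nil => simp at h
        | cons a t => cases t with
          | nil => exact ⟨a, rfl⟩
          | cons b t => simp at h
      simp [findUnit]
    · have hb : (c.length == 1) = false := by simp [h]
      simp [findUnit, hb, h] at *
      exact ih

-- the clause component of A's unit_propagate = B's unitLoop, any assignment, same fuel
theorem unit_propagate_fst (fuel : Nat) (clauses : List (List Int)) (a : PySem.Dict Int Bool) :
    (unit_propagate fuel clauses a).1 = unitLoop fuel clauses := by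
  induction fuel generalizing clauses a with
  | zero => rfl
  | succ f ih =>
    rw [unit_propagate, unitLoop, ← find?_eq_findUnit]
    cases hf : clauses.find? (fun c => c.length == 1) with
    | none => simp
    | some c =>
      simp only [Option.map_some]
      rw [ih, upNew_eq_elim]

-- foldl of per-key filters = one filter by "some selected key occurs"
theorem foldl_filter_aux (p : Int → Bool) (g : PySem.Dict Int Bool → Int → PySem.Dict Int Bool)
    (keys : List Int) (cls : List (List Int)) (a : PySem.Dict Int Bool) :
    (keys.foldl (fun st lit =>
        if p lit then (st.1.filter (fun c => decide (lit ∉ c)), g st.2 lit) else st) (cls, a)).1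
      = cls.filter (fun c => !(keys.any (fun l => p l && decide (l ∈ c)))) := by
  induction keys generalizing cls a with
  | nil => simp
  | cons k ks ih =>
    simp only [List.foldl_cons]
    by_cases hp : p k = true
    · rw [if_pos hp, ih, List.filter_filter]
      refine List.filter_congr (fun c _ => ?_)
      simp [hp, Bool.and_comm]
    · rw [if_neg hp, ih]
      refine List.filter_congr (fun c _ => ?_)
      simp only [Bool.not_eq_true] at hp
      simp [hp]

-- the clause component of A's pure_literal_assign = B's pureElim, any assignment
theorem pure_literal_assign_fst (clauses : List (List Int)) (a : PySem.Dict Int Bool) :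
    (pure_literal_assign clauses a).1 = pureElim clauses := by
  have hc : clauses.foldl (fun d c => c.foldl (fun d lit => d.insert lit (d.getD lit 0 + 1)) d)
      PySem.Dict.empty = PySem.Dict.counter (clauses.flatMap id) := by
    rw [List.flatMap_id, ← PySem.Dict.foldl_insert_getD_add_one_eq_counter, List.foldl_flatten]
  have hp : ∀ l : Int, ((PySem.Dict.counter (clauses.flatMap id)).get? (-l)).isNone
      = decide (-l ∉ PySem.Set.ofList (clauses.flatMap id)) := by
    intro l
    rw [Bool.eq_iff_iff]
    simp [Option.isNone_iff_eq_none, PySem.Dict.get?_eq_none_iff_contains,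
      PySem.Dict.contains_counter, PySem.Set.mem_ofList]
  simp only [pure_literal_assign, pureElim, hc, PySem.Dict.keys_counter]
  rw [foldl_filter_aux (fun lit => ((PySem.Dict.counter (List.flatMap id clauses)).get? (-lit)).isNone)
    (fun d lit => d.insert (lit.natAbs : Int) (decide (lit > 0)))]
  refine List.filter_congr (fun c _ => ?_)
  rw [List.any_filter]
  simp only [hp]

-- dp_solver's own new_clauses loop = the same comprehension
theorem branch_aux (v : Int) (cs : List (List Int)) (acc : List (List Int)) :
    cs.foldl (fun acc clause =>
      if v ∈ clause then acc
      else acc ++ [clause.filter (fun x => decide (x ≠ -v))]) acc = acc ++ elim v cs := by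
  induction cs generalizing acc with
  | nil => simp [elim]
  | cons c cs ih =>
    simp only [List.foldl_cons]
    by_cases h1 : v ∈ c
    · rw [if_pos h1, ih]
      simp [elim, h1]
    · rw [if_neg h1, ih]
      simp [elim, h1]

theorem branch_eq_elim (v : Int) (cls : List (List Int)) :
    cls.foldl (fun acc clause =>
      if v ∈ clause then acc
      else acc ++ [clause.filter (fun x => decide (x ≠ -v))]) [] = elim v cls := by
  have h := branch_aux v cls []
  rwa [List.nil_append] at h

theorem dpGo_eq_dpAltGo (fuel : Nat) (clauses : List (List Int)) : dpGo fuel clauses = dpAltGo fuel clauses := by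
  induction fuel generalizing clauses with
  | zero => rfl
  | succ f ih =>
    rw [dpGo, dpAltGo]
    simp only [unit_propagate_fst, pure_literal_assign_fst]
    rw [branch_eq_elim, ih]

-- ===== VERDICT (by name: the statement is the Claim_ definition above) =====
theorem dp_solver_spec : Claim_equal_dp_solver := by
  intro clauses _
  unfold Spec_dp_solver dp_solver dp_solver_alt
  exact dpGo_eq_dpAltGo _ _
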